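-- pv_equiv track=rewrite | github.com/kristina-arabov/cisc498-mass-spec | Unwarping_App/services/sampling_service.py | serpentinePath
-- ===== SOURCE A (Python) =====
-- from collections import defaultdict
--
-- def serpentinePath(locations):
--     rows = defaultdict(list)
--
--     for x, y in locations:
--         rows[y].append((x, y))
--
--     serpentine = []
--
--     # Move down on Y and reverse X (alternating)
--     for i, y in enumerate(sorted(rows, reverse=True)):
--         row = sorted(rows[y])
--         serpentine.extend(row if i % 2 == 0 else row[::-1])
--
--     return serpentine
-- ===== SOURCE B (Python) =====
-- def serpentinePath(locations):
--     # One global sort by (-y, x), then a single pass that slices off maximal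
--     # equal-y runs, emitting them forward / reversed alternately.
--     rest = sorted(locations, key=lambda p: (-p[1], p[0]))
--     out = []
--     forward = True
--     while rest:
--         y = rest[0][1]
--         k = 0
--         while k < len(rest) and rest[k][1] == y:
--             k += 1
--         run = rest[:k]
--         out.extend(run if forward else run[::-1])
--         rest = rest[k:]
--         forward = not forward
--     return out
-- ===== Notes on version B (the rewrite author's own statement) =====
-- stated objective: alternative
-- what changed: Replaces the dict-of-rows plus one sort per row with a single global sort on the key (-y, x) followed by one linear run-grouping pass that emits each equal-y run forward or reversed alternately.
import Mathlib
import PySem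

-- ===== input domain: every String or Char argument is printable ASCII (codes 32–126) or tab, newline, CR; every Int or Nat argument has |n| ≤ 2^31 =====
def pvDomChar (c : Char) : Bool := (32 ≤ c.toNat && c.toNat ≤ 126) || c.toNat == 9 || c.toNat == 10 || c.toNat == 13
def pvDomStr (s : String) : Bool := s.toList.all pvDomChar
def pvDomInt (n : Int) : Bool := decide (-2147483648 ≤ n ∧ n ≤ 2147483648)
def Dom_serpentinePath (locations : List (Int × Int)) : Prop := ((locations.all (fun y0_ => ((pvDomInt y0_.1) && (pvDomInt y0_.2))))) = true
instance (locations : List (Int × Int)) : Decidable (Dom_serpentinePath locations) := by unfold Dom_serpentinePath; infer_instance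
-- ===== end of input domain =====

-- B replaces A's dict-of-rows with one sort per row by a single global sort on (-y, x)
-- plus one linear run-grouping pass (alternative decomposition, same cost class).

-- ===== PORT A =====
def serpentinePath (locations : List (Int × Int)) : List (Int × Int) :=
  -- rows = defaultdict(list); for x, y in locations: rows[y].append((x, y))
  -- (rows[y].append(..) = store y ↦ old value ++ [(x, y)]; a fresh key lands at the end: exact dict insertion order)
  let rows : PySem.Dict Int (List (Int × Int)) :=
    locations.foldl (fun d p => d.insert p.2 (d.getD p.2 [] ++ [(p.1, p.2)])) PySem.Dict.empty
  -- for i, y in enumerate(sorted(rows, reverse=True)): row = sorted(rows[y]); serpentine.extend(row if i % 2 == 0 else row[::-1])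
  -- (row[::-1] is row.reverse, exact by PySem.List.slice?_none_none_neg_one)
  (PySem.List.enumerate (PySem.List.sorted rows.keys (fun y => y) true)).foldl
    (fun serpentine iy =>
      let row := PySem.List.sorted2 (rows.getD iy.2 []) (fun p => p.1) (fun p => p.2) false
      serpentine ++ (if PySem.Int.mod iy.1 2 == 0 then row else row.reverse)) []

-- ===== PORT B =====
-- the while loop of Source B: run = rest[:k] is the maximal equal-y prefix (takeWhile), rest = rest[k:] (dropWhile)
def pvSerpRuns : Bool → List (Int × Int) → List (Int × Int)
  | _, [] => []
  | forward, p :: rest =>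
    (if forward then p :: rest.takeWhile (fun q => q.2 == p.2)
     else (p :: rest.takeWhile (fun q => q.2 == p.2)).reverse) ++
      pvSerpRuns (!forward) (rest.dropWhile (fun q => q.2 == p.2))
termination_by _ l => l.length
decreasing_by simpa [Nat.lt_succ_iff] using List.length_dropWhile_le (fun q => q.2 == p.2) rest

def serpentinePath_alt (locations : List (Int × Int)) : List (Int × Int) :=
  pvSerpRuns true (PySem.List.sorted2 locations (fun p => -p.2) (fun p => p.1) false)

-- ===== PRECONDITION & SPEC =====
def Spec_serpentinePath (locations : List (Int × Int)) (out : List (Int × Int)) : Prop := out = serpentinePath_alt locations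
instance (locations : List (Int × Int)) (out : List (Int × Int)) : Decidable (Spec_serpentinePath locations out) := by unfold Spec_serpentinePath; infer_instance

-- ===== CLAIM (what is proved, stated in full; the proofs are below) =====
def Claim_equal_serpentinePath : Prop := ∀ (locations : List (Int × Int)), Dom_serpentinePath locations → Spec_serpentinePath locations (serpentinePath locations)

-- ===== LEMMAS AND PROOFS =====

-- proof-side names for the pieces of port A
def pvRows (l : List (Int × Int)) : PySem.Dict Int (List (Int × Int)) :=
  l.foldl (fun d p => d.insert p.2 (d.getD p.2 [] ++ [(p.1, p.2)])) PySem.Dict.empty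

def pvRowF (l : List (Int × Int)) (y : Int) : List (Int × Int) :=
  PySem.List.sorted2 ((pvRows l).getD y []) (fun p => p.1) (fun p => p.2) false

def pvKs (l : List (Int × Int)) : List Int :=
  PySem.List.sorted (pvRows l).keys (fun y => y) true

-- the serpentine traversal, abstractly: rows in order, direction alternating
def pvSerp (row : Int → List (Int × Int)) : Bool → List Int → List (Int × Int)
  | _, [] => []
  | fwd, y :: t => (if fwd then row y else (row y).reverse) ++ pvSerp row (!fwd) t

lemma pv_before_eq (k1 k2 : (Int × Int) → Int) (a b : Int × Int) :
    (decide (k1 a < k1 b) || (!decide (k1 b < k1 a) && decide (k2 a < k2 b)))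
      = decide (toLex (k1 a, k2 a) < toLex (k1 b, k2 b)) := by
  simp only [Prod.Lex.toLex_lt_toLex]
  by_cases h1 : k1 a < k1 b
  · simp [h1]
  · by_cases h2 : k1 b < k1 a
    · have h3 : ¬ (k1 a = k1 b) := by omega
      simp [h3]
      omega
    · have h3 : k1 a = k1 b := by omega
      simp [h3]

-- a Python sort under the tuple key (k1, k2) is the sort under the lexicographic key
lemma pv_sorted2_eq (xs : List (Int × Int)) (k1 k2 : (Int × Int) → Int) :
    PySem.List.sorted2 xs k1 k2 false
      = PySem.List.sorted xs (fun p => toLex (k1 p, k2 p)) false := by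
  simp only [PySem.List.sorted2, PySem.List.sorted]
  have h : (fun (a b : Int × Int) =>
        (decide (k1 a < k1 b) || (!decide (k1 b < k1 a) && decide (k2 a < k2 b))))
      = fun a b => decide (toLex (k1 a, k2 a) < toLex (k1 b, k2 b)) := by
    funext a b; exact pv_before_eq k1 k2 a b
  simp only [Bool.false_eq_true, if_false]
  rw [h]

-- the dict built by A holds, under each key y, exactly the points of l with second component y
lemma pvRows_getD_aux :
    ∀ (l : List (Int × Int)) (d : PySem.Dict Int (List (Int × Int))) (y : Int),
      (l.foldl (fun d p => d.insert p.2 (d.getD p.2 [] ++ [(p.1, p.2)])) d).getD y []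
        = d.getD y [] ++ l.filter (fun p => p.2 == y) := by
  intro l
  induction l with
  | nil => intro d y; simp
  | cons p t ih =>
    intro d y
    simp only [List.foldl_cons, List.filter_cons]
    rw [ih]
    by_cases hy : y = p.2
    · subst hy
      rw [PySem.Dict.getD_insert]
      simp
    · rw [PySem.Dict.getD_insert]
      simp only [if_neg hy]
      have : (p.2 == y) = false := by simp [Ne.symm hy]
      simp [this]

lemma pvRows_getD (l : List (Int × Int)) (y : Int) :
    (pvRows l).getD y [] = l.filter (fun p => p.2 == y) := by
  unfold pvRows
  rw [pvRows_getD_aux]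
  simp [PySem.Dict.getD, PySem.Dict.get?_empty]

lemma pvRows_mem_keys_aux :
    ∀ (l : List (Int × Int)) (d : PySem.Dict Int (List (Int × Int))) (y : Int),
      (y ∈ (l.foldl (fun d p => d.insert p.2 (d.getD p.2 [] ++ [(p.1, p.2)])) d).keys
        ↔ y ∈ d.keys ∨ y ∈ l.map Prod.snd) := by
  intro l
  induction l with
  | nil => intro d y; simp
  | cons p t ih =>
    intro d y
    simp only [List.foldl_cons, List.map_cons, List.mem_cons]
    rw [ih, PySem.Dict.mem_keys_insert]
    tauto

lemma pvRows_mem_keys (l : List (Int × Int)) (y : Int) :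
    y ∈ (pvRows l).keys ↔ y ∈ l.map Prod.snd := by
  unfold pvRows
  rw [pvRows_mem_keys_aux]
  simp [PySem.Dict.empty]

lemma pvRows_nodup_keys_aux :
    ∀ (l : List (Int × Int)) (d : PySem.Dict Int (List (Int × Int))),
      d.keys.Nodup →
      (l.foldl (fun d p => d.insert p.2 (d.getD p.2 [] ++ [(p.1, p.2)])) d).keys.Nodup := by
  intro l
  induction l with
  | nil => intro d hd; simpa using hd
  | cons p t ih =>
    intro d hd
    simp only [List.foldl_cons]
    exact ih _ (PySem.Dict.nodup_keys_insert _ _ _ hd)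

lemma pvRows_nodup_keys (l : List (Int × Int)) : (pvRows l).keys.Nodup := by
  unfold pvRows
  exact pvRows_nodup_keys_aux l _ (by simp [PySem.Dict.empty, PySem.Dict.keys])

-- port A computes pvSerp over the descending distinct y's
lemma pv_flatMap_enum (row : Int → List (Int × Int)) :
    ∀ (ks : List Int) (n : Int),
      (PySem.List.enumerate ks n).flatMap
          (fun iy => if PySem.Int.mod iy.1 2 == 0 then row iy.2 else (row iy.2).reverse)
        = pvSerp row (PySem.Int.mod n 2 == 0) ks := by
  intro ks
  induction ks with
  | nil => intro n; simp [PySem.List.enumerate, pvSerp]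
  | cons y t ih =>
    intro n
    have hflip : (PySem.Int.mod (n + 1) 2 == 0) = !(PySem.Int.mod n 2 == 0) := by
      rw [PySem.Int.mod_eq_emod_of_pos (by norm_num), PySem.Int.mod_eq_emod_of_pos (by norm_num)]
      by_cases h : n % 2 = 0
      · have h1 : (n + 1) % 2 = 1 := by omega
        simp [h, h1]
      · have h1 : (n + 1) % 2 = 0 := by omega
        have h2 : (n % 2 == 0) = false := by simp [h]
        simp [h1, h2]
    simp only [PySem.List.enumerate, List.flatMap_cons, pvSerp, ih, hflip]

lemma pv_A_eq_serp (l : List (Int × Int)) :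
    serpentinePath l = pvSerp (pvRowF l) true (pvKs l) := by
  have h0 : serpentinePath l
      = (PySem.List.enumerate (pvKs l) 0).foldl
          (fun acc iy =>
            acc ++ (if PySem.Int.mod iy.1 2 == 0 then pvRowF l iy.2 else (pvRowF l iy.2).reverse))
          [] := rfl
  rw [h0, PySem.List.foldl_append_eq_flatMap]
  rw [List.nil_append, pv_flatMap_enum (pvRowF l) (pvKs l) 0]
  have h2 : (PySem.Int.mod 0 2 == 0) = true := by decide
  rw [h2]

-- port B's run-splitter on a flatten of nonempty constant-y rows with pairwise distinct y's
lemma pv_runs_eq_serp (row : Int → List (Int × Int)) :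
    ∀ (ks : List Int) (fwd : Bool),
      (∀ y ∈ ks, row y ≠ []) →
      (∀ y ∈ ks, ∀ p ∈ row y, p.2 = y) →
      ks.Pairwise (· ≠ ·) →
      pvSerpRuns fwd ((ks.map row).flatten) = pvSerp row fwd ks := by
  intro ks
  induction ks with
  | nil => intro fwd _ _ _; simp [pvSerpRuns, pvSerp]
  | cons y t ih =>
    intro fwd hne hsnd hpw
    obtain ⟨p, tp, hrow⟩ : ∃ p tp, row y = p :: tp := by
      cases h : row y with
      | nil => exact absurd h (hne y (by simp))
      | cons a b => exact ⟨a, b, rfl⟩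
    have hp2 : p.2 = y := hsnd y (by simp) p (by simp [hrow])
    have htp : ∀ q ∈ tp, (q.2 == p.2) = true := by
      intro q hq
      have := hsnd y (by simp) q (by simp [hrow, hq])
      simp [this, hp2]
    have hrest : ∀ q ∈ (t.map row).flatten, (q.2 == p.2) = false := by
      intro q hq
      rw [List.mem_flatten] at hq
      obtain ⟨l', hl', hql'⟩ := hq
      rw [List.mem_map] at hl'
      obtain ⟨y', hy', rfl⟩ := hl'
      have hqy' : q.2 = y' := hsnd y' (by simp [hy']) q hql'
      have hne' : y' ≠ y := Ne.symm ((List.pairwise_cons.mp hpw).1 y' hy')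
      simp [hqy', hp2, hne']
    have hflat : ((y :: t).map row).flatten = p :: (tp ++ (t.map row).flatten) := by
      simp [hrow]
    have htake : (tp ++ (t.map row).flatten).takeWhile (fun q => q.2 == p.2) = tp := by
      rw [List.takeWhile_append_of_pos htp]
      cases hfl : (t.map row).flatten with
      | nil => simp
      | cons q r =>
        have hq : (q.2 == p.2) = false := hrest q (by simp [hfl])
        simp [hq]
    have hdrop : (tp ++ (t.map row).flatten).dropWhile (fun q => q.2 == p.2)
        = (t.map row).flatten := by
      rw [List.dropWhile_append_of_pos htp]
      cases hfl : (t.map row).flatten with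
      | nil => simp
      | cons q r =>
        have hq : (q.2 == p.2) = false := hrest q (by simp [hfl])
        simp [hq]
    rw [hflat]
    simp only [pvSerpRuns]
    rw [htake, hdrop]
    have hih := ih (!fwd) (fun y' hy' => hne y' (by simp [hy']))
      (fun y' hy' => hsnd y' (by simp [hy'])) (List.pairwise_cons.mp hpw).2
    simp only [pvSerp, hrow, hih]

-- flatten of the per-y filters of l, over distinct y's covering l, is a permutation of l
lemma pv_flatten_filter_perm :
    ∀ (ks : List Int) (l : List (Int × Int)), ks.Nodup → (∀ p ∈ l, p.2 ∈ ks) →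
      ((ks.map fun y => l.filter (fun p => p.2 == y)).flatten).Perm l := by
  intro ks
  induction ks with
  | nil =>
    intro l _ hcov
    cases l with
    | nil => simp
    | cons p t => exact absurd (hcov p (by simp)) (by simp)
  | cons y t ih =>
    intro l hnd hcov
    simp only [List.map_cons, List.flatten_cons]
    have hy_notin : y ∉ t := (List.nodup_cons.mp hnd).1
    have hfilt : ∀ y' ∈ t,
        l.filter (fun p => p.2 == y')
          = (l.filter (fun p => !(p.2 == y))).filter (fun p => p.2 == y') := by
      intro y' hy'
      rw [List.filter_filter]
      apply List.filter_congr
      intro p _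
      by_cases h : p.2 = y'
      · have hne2 : ¬ y' = y := fun hh => hy_notin (hh ▸ hy')
        simp [h, hne2]
      · simp [h]
    have hmap : t.map (fun y' => l.filter (fun p => p.2 == y'))
        = t.map (fun y' => (l.filter (fun p => !(p.2 == y))).filter (fun p => p.2 == y')) :=
      List.map_congr_left hfilt
    rw [hmap]
    have hih := ih (l.filter (fun p => !(p.2 == y))) (List.nodup_cons.mp hnd).2 (by
      intro p hp
      rw [List.mem_filter] at hp
      have := hcov p hp.1
      simp only [List.mem_cons] at this
      rcases this with h | h
      · exfalso; revert hp; simp [h]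
      · exact h)
    exact (List.Perm.append_left _ hih).trans (List.filter_append_perm _ l)

-- pointwise permutations of the rows give a permutation of the flattens
lemma pv_flatten_perm_congr (ks : List Int) (f g : Int → List (Int × Int))
    (h : ∀ y ∈ ks, (f y).Perm (g y)) :
    ((ks.map f).flatten).Perm ((ks.map g).flatten) := by
  induction ks with
  | nil => simp
  | cons y t ih =>
    simp only [List.map_cons, List.flatten_cons]
    exact (h y (by simp)).append (ih (fun y' hy' => h y' (by simp [hy'])))

-- the global B sort equals the concatenation of A's sorted rows
lemma pv_sorted_eq_flatten (l : List (Int × Int)) :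
    PySem.List.sorted2 l (fun p => -p.2) (fun p => p.1) false
      = ((pvKs l).map (pvRowF l)).flatten := by
  have hrowsnd : ∀ y, ∀ p ∈ pvRowF l y, p.2 = y := by
    intro y p hp
    have : p ∈ (pvRows l).getD y [] :=
      ((PySem.List.sorted2_perm _ _ _ _).mem_iff).mp hp
    rw [pvRows_getD] at this
    simpa using (List.mem_filter.mp this).2
  have hksnd : (pvKs l).Nodup :=
    (PySem.List.sorted_perm _ _ _).nodup_iff.mpr (pvRows_nodup_keys l)
  have hksgt : (pvKs l).Pairwise (fun a b => b < a) := by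
    have h1 : (pvKs l).Pairwise (fun a b => b ≤ a) :=
      PySem.List.sorted_pairwise_rev _ _
    have h2 : (pvKs l).Pairwise (fun a b => a ≠ b) := hksnd
    exact (h1.and h2).imp (fun h => lt_of_le_of_ne h.1 (Ne.symm h.2))
  -- pairwise ordering of the flatten
  have hpflat : (((pvKs l).map (pvRowF l)).flatten).Pairwise (fun a b : Int × Int => (toLex (-a.2, a.1) : Lex (Int × Int)) ≤ toLex (-b.2, b.1)) := by
    rw [List.pairwise_flatten]
    constructor
    · intro r hr
      rw [List.mem_map] at hr
      obtain ⟨y, hy, rfl⟩ := hr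
      have hs : (pvRowF l y).Pairwise
          (fun a b => toLex (a.1, a.2) ≤ toLex (b.1, b.2)) := by
        have := PySem.List.sorted_pairwise ((pvRows l).getD y [])
          (fun p => toLex (p.1, p.2))
        rw [pvRowF, pv_sorted2_eq]
        exact this
      apply hs.imp_of_mem
      intro a b ha hb hab
      have ha2 : a.2 = y := hrowsnd y a ha
      have hb2 : b.2 = y := hrowsnd y b hb
      rw [Prod.Lex.toLex_le_toLex] at hab ⊢
      rcases hab with h | h
      · right; constructor
        · simp [ha2, hb2]
        · exact le_of_lt h
      · right; constructor
        · simp [ha2, hb2]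
        · exact le_of_eq h.1
    · rw [List.pairwise_map]
      apply hksgt.imp_of_mem
      intro y y' _ _ hlt a ha b hb
      have ha2 : a.2 = y := hrowsnd y a ha
      have hb2 : b.2 = y' := hrowsnd y' b hb
      rw [Prod.Lex.toLex_le_toLex]
      left
      simp [ha2, hb2]
      omega
  -- pairwise ordering of B's sort
  have hpB : (PySem.List.sorted2 l (fun p => -p.2) (fun p => p.1) false).Pairwise
      (fun a b : Int × Int => (toLex (-a.2, a.1) : Lex (Int × Int)) ≤ toLex (-b.2, b.1)) := by
    rw [pv_sorted2_eq]
    exact PySem.List.sorted_pairwise l (fun p => toLex (-p.2, p.1))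
  -- both are permutations of l
  have hpermB : (PySem.List.sorted2 l (fun p => -p.2) (fun p => p.1) false).Perm l :=
    PySem.List.sorted2_perm _ _ _ _
  have hpermF : (((pvKs l).map (pvRowF l)).flatten).Perm l := by
    have h1 : (((pvKs l).map (pvRowF l)).flatten).Perm
        (((pvKs l).map fun y => l.filter (fun p => p.2 == y)).flatten) := by
      apply pv_flatten_perm_congr
      intro y _
      have : (pvRowF l y).Perm ((pvRows l).getD y []) :=
        PySem.List.sorted2_perm _ _ _ _
      rw [pvRows_getD] at this
      exact this
    refine h1.trans ?_
    apply pv_flatten_filter_perm _ _ hksnd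
    intro p hp
    rw [pvKs, PySem.List.mem_sorted, pvRows_mem_keys]
    exact List.mem_map_of_mem hp
  -- antisymmetry of the key ordering
  apply List.Perm.eq_of_pairwise _ hpB hpflat (hpermB.trans hpermF.symm)
  intro a b _ _ hab hba
  have hk : (toLex (-a.2, a.1) : Lex (Int × Int)) = toLex (-b.2, b.1) := le_antisymm hab hba
  have h2 : a.2 = b.2 ∧ a.1 = b.1 := by
    have h5 := congrArg (fun x => ofLex x) hk
    simpa using h5
  exact Prod.ext_iff.mpr ⟨h2.2, h2.1⟩

-- ===== VERDICT (by name: the statement is the Claim_ definition above) =====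
theorem serpentinePath_spec : Claim_equal_serpentinePath := by
  intro locations _
  unfold Spec_serpentinePath
  rw [pv_A_eq_serp]
  unfold serpentinePath_alt
  rw [pv_sorted_eq_flatten]
  symm
  apply pv_runs_eq_serp
  · -- rows are nonempty
    intro y hy
    rw [pvKs, PySem.List.mem_sorted, pvRows_mem_keys, List.mem_map] at hy
    obtain ⟨p, hp, hpy⟩ := hy
    have hpf : p ∈ (pvRows locations).getD y [] := by
      rw [pvRows_getD]
      exact List.mem_filter.mpr ⟨hp, by simp [hpy]⟩
    have hmem : p ∈ pvRowF locations y :=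
      ((PySem.List.sorted2_perm _ _ _ _).mem_iff).mpr hpf
    intro hcontra
    rw [pvRowF] at hcontra hmem
    rw [hcontra] at hmem
    simp at hmem
  · intro y _ p hp
    have : p ∈ (pvRows locations).getD y [] :=
      ((PySem.List.sorted2_perm _ _ _ _).mem_iff).mp hp
    rw [pvRows_getD] at this
    simpa using (List.mem_filter.mp this).2
  · exact ((PySem.List.sorted_perm _ _ _).nodup_iff.mpr (pvRows_nodup_keys locations))
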